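-- pv_equiv track=rewrite | github.com/bit-short/arogyadost-backend | migrate_to_db.py | get_biomarker_category
-- ===== SOURCE A (Python) =====
-- def get_biomarker_category(name):
--     """Map biomarker name to category."""
--     categories = {
--         'metabolic': ['hba1c', 'glucose_fasting', 'insulin'],
--         'lipids': ['total_cholesterol', 'hdl', 'ldl', 'triglycerides', 'vldl'],
--         'vitamins': ['vitamin_d', 'vitamin_b12'],
--         'thyroid': ['tsh', 't3', 't4'],
--         'liver': ['sgot', 'sgpt', 'bilirubin_total', 'alkaline_phosphatase'],
--         'kidney': ['creatinine', 'urea', 'uric_acid'],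
--         'electrolytes': ['sodium', 'chloride', 'calcium', 'potassium'],
--         'hormones': ['testosterone', 'prolactin', 'fsh', 'lh'],
--         'iron': ['iron', 'tibc', 'transferrin_saturation'],
--         'cbc': ['hemoglobin', 'hematocrit', 'wbc', 'platelets', 'rbc']
--     }
--     for cat, markers in categories.items():
--         if name.lower() in markers:
--             return cat
--     return 'other'
-- ===== SOURCE B (Python) =====
-- _MARKER_TO_CATEGORY = {
--     'hba1c': 'metabolic', 'glucose_fasting': 'metabolic', 'insulin': 'metabolic',
--     'total_cholesterol': 'lipids', 'hdl': 'lipids', 'ldl': 'lipids',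
--     'triglycerides': 'lipids', 'vldl': 'lipids',
--     'vitamin_d': 'vitamins', 'vitamin_b12': 'vitamins',
--     'tsh': 'thyroid', 't3': 'thyroid', 't4': 'thyroid',
--     'sgot': 'liver', 'sgpt': 'liver', 'bilirubin_total': 'liver',
--     'alkaline_phosphatase': 'liver',
--     'creatinine': 'kidney', 'urea': 'kidney', 'uric_acid': 'kidney',
--     'sodium': 'electrolytes', 'chloride': 'electrolytes',
--     'calcium': 'electrolytes', 'potassium': 'electrolytes',
--     'testosterone': 'hormones', 'prolactin': 'hormones',
--     'fsh': 'hormones', 'lh': 'hormones',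
--     'iron': 'iron', 'tibc': 'iron', 'transferrin_saturation': 'iron',
--     'hemoglobin': 'cbc', 'hematocrit': 'cbc', 'wbc': 'cbc',
--     'platelets': 'cbc', 'rbc': 'cbc',
-- }
--
-- def get_biomarker_category(name):
--     """Map biomarker name to category."""
--     return _MARKER_TO_CATEGORY.get(name.lower(), 'other')
-- ===== Notes on version B (the rewrite author's own statement) =====
-- stated objective: idiomatic
-- what changed: Replaced the per-category membership scan over a dict of lists by a single flat inverted marker-to-category dict built once, so the function is one constant-time dict lookup with a default and no loop.
import Mathlib
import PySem

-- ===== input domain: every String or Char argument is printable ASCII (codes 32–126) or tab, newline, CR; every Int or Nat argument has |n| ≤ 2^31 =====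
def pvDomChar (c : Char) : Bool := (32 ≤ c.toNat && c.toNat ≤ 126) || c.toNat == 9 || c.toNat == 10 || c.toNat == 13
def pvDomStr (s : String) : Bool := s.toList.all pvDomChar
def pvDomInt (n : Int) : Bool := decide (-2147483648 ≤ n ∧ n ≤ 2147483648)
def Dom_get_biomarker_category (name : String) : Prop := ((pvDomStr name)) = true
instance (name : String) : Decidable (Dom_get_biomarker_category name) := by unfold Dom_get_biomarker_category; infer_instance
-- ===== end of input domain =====

-- B replaces A's scan over per-category marker lists by one flat inverted marker→category
-- dict and a single .get with default — more idiomatic, no loop at call time.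

-- ===== PORT A =====
-- the dict literal of A, in insertion order
def pvCategories : List (String × List String) :=
  [("metabolic", ["hba1c", "glucose_fasting", "insulin"]),
    ("lipids", ["total_cholesterol", "hdl", "ldl", "triglycerides", "vldl"]),
    ("vitamins", ["vitamin_d", "vitamin_b12"]),
    ("thyroid", ["tsh", "t3", "t4"]),
    ("liver", ["sgot", "sgpt", "bilirubin_total", "alkaline_phosphatase"]),
    ("kidney", ["creatinine", "urea", "uric_acid"]),
    ("electrolytes", ["sodium", "chloride", "calcium", "potassium"]),
    ("hormones", ["testosterone", "prolactin", "fsh", "lh"]),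
    ("iron", ["iron", "tibc", "transferrin_saturation"]),
    ("cbc", ["hemoglobin", "hematocrit", "wbc", "platelets", "rbc"])]

-- the for-loop with early return: scan the items, return the first category whose
-- marker list contains name.lower(); 'other' if none
def pvScan (name : String) : List (String × List String) → String
  | [] => "other"
  | (cat, markers) :: rest =>
      if (PySem.Str.lower name) ∈ markers then cat else pvScan name rest

def get_biomarker_category (name : String) : String :=
  pvScan name pvCategories

-- ===== PORT B =====
-- the flat inverted dict literal of Source B
def pvMarkerToCategory : PySem.Dict String String :=
  PySem.Dict.ofList
  [("hba1c", "metabolic"),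
    ("glucose_fasting", "metabolic"),
    ("insulin", "metabolic"),
    ("total_cholesterol", "lipids"),
    ("hdl", "lipids"),
    ("ldl", "lipids"),
    ("triglycerides", "lipids"),
    ("vldl", "lipids"),
    ("vitamin_d", "vitamins"),
    ("vitamin_b12", "vitamins"),
    ("tsh", "thyroid"),
    ("t3", "thyroid"),
    ("t4", "thyroid"),
    ("sgot", "liver"),
    ("sgpt", "liver"),
    ("bilirubin_total", "liver"),
    ("alkaline_phosphatase", "liver"),
    ("creatinine", "kidney"),
    ("urea", "kidney"),
    ("uric_acid", "kidney"),
    ("sodium", "electrolytes"),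
    ("chloride", "electrolytes"),
    ("calcium", "electrolytes"),
    ("potassium", "electrolytes"),
    ("testosterone", "hormones"),
    ("prolactin", "hormones"),
    ("fsh", "hormones"),
    ("lh", "hormones"),
    ("iron", "iron"),
    ("tibc", "iron"),
    ("transferrin_saturation", "iron"),
    ("hemoglobin", "cbc"),
    ("hematocrit", "cbc"),
    ("wbc", "cbc"),
    ("platelets", "cbc"),
    ("rbc", "cbc")]

def get_biomarker_category_alt (name : String) : String :=
  pvMarkerToCategory.getD (PySem.Str.lower name) "other"

-- ===== PRECONDITION & SPEC =====
def Spec_get_biomarker_category (name : String) (out : String) : Prop := out = get_biomarker_category_alt name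
instance (name : String) (out : String) : Decidable (Spec_get_biomarker_category name out) := by unfold Spec_get_biomarker_category; infer_instance

-- ===== CLAIM (what is proved, stated in full; the proofs are below) =====
def Claim_equal_get_biomarker_category : Prop := ∀ (name : String), Dom_get_biomarker_category name → Spec_get_biomarker_category name (get_biomarker_category name)

-- ===== LEMMAS AND PROOFS =====

set_option maxRecDepth 20000 in
theorem pvScan_eq_getD (name : String) :
    pvScan name pvCategories = pvMarkerToCategory.getD (PySem.Str.lower name) "other" := by
  rw [show pvMarkerToCategory = PySem.Dict.mk
      [("hba1c", "metabolic"),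
      ("glucose_fasting", "metabolic"),
      ("insulin", "metabolic"),
      ("total_cholesterol", "lipids"),
      ("hdl", "lipids"),
      ("ldl", "lipids"),
      ("triglycerides", "lipids"),
      ("vldl", "lipids"),
      ("vitamin_d", "vitamins"),
      ("vitamin_b12", "vitamins"),
      ("tsh", "thyroid"),
      ("t3", "thyroid"),
      ("t4", "thyroid"),
      ("sgot", "liver"),
      ("sgpt", "liver"),
      ("bilirubin_total", "liver"),
      ("alkaline_phosphatase", "liver"),
      ("creatinine", "kidney"),
      ("urea", "kidney"),
      ("uric_acid", "kidney"),
      ("sodium", "electrolytes"),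
      ("chloride", "electrolytes"),
      ("calcium", "electrolytes"),
      ("potassium", "electrolytes"),
      ("testosterone", "hormones"),
      ("prolactin", "hormones"),
      ("fsh", "hormones"),
      ("lh", "hormones"),
      ("iron", "iron"),
      ("tibc", "iron"),
      ("transferrin_saturation", "iron"),
      ("hemoglobin", "cbc"),
      ("hematocrit", "cbc"),
      ("wbc", "cbc"),
      ("platelets", "cbc"),
      ("rbc", "cbc")] from rfl]
  simp only [pvScan, pvCategories]
  generalize PySem.Str.lower name = t
  by_cases e0 : t = "hba1c"
  · subst e0; decide
  by_cases e1 : t = "glucose_fasting"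
  · subst e1; decide
  by_cases e2 : t = "insulin"
  · subst e2; decide
  by_cases e3 : t = "total_cholesterol"
  · subst e3; decide
  by_cases e4 : t = "hdl"
  · subst e4; decide
  by_cases e5 : t = "ldl"
  · subst e5; decide
  by_cases e6 : t = "triglycerides"
  · subst e6; decide
  by_cases e7 : t = "vldl"
  · subst e7; decide
  by_cases e8 : t = "vitamin_d"
  · subst e8; decide
  by_cases e9 : t = "vitamin_b12"
  · subst e9; decide
  by_cases e10 : t = "tsh"
  · subst e10; decide
  by_cases e11 : t = "t3"
  · subst e11; decide
  by_cases e12 : t = "t4"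
  · subst e12; decide
  by_cases e13 : t = "sgot"
  · subst e13; decide
  by_cases e14 : t = "sgpt"
  · subst e14; decide
  by_cases e15 : t = "bilirubin_total"
  · subst e15; decide
  by_cases e16 : t = "alkaline_phosphatase"
  · subst e16; decide
  by_cases e17 : t = "creatinine"
  · subst e17; decide
  by_cases e18 : t = "urea"
  · subst e18; decide
  by_cases e19 : t = "uric_acid"
  · subst e19; decide
  by_cases e20 : t = "sodium"
  · subst e20; decide
  by_cases e21 : t = "chloride"
  · subst e21; decide
  by_cases e22 : t = "calcium"
  · subst e22; decide
  by_cases e23 : t = "potassium"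
  · subst e23; decide
  by_cases e24 : t = "testosterone"
  · subst e24; decide
  by_cases e25 : t = "prolactin"
  · subst e25; decide
  by_cases e26 : t = "fsh"
  · subst e26; decide
  by_cases e27 : t = "lh"
  · subst e27; decide
  by_cases e28 : t = "iron"
  · subst e28; decide
  by_cases e29 : t = "tibc"
  · subst e29; decide
  by_cases e30 : t = "transferrin_saturation"
  · subst e30; decide
  by_cases e31 : t = "hemoglobin"
  · subst e31; decide
  by_cases e32 : t = "hematocrit"
  · subst e32; decide
  by_cases e33 : t = "wbc"
  · subst e33; decide
  by_cases e34 : t = "platelets"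
  · subst e34; decide
  by_cases e35 : t = "rbc"
  · subst e35; decide
  simp [PySem.Dict.getD, PySem.Dict.get?, List.find?, e0, e1, e2, e3, e4, e5, e6, e7, e8, e9, e10, e11, e12, e13, e14, e15, e16, e17, e18, e19, e20, e21, e22, e23, e24, e25, e26, e27, e28, e29, e30, e31, e32, e33, e34, e35,
    show ("hba1c" == t) = false from by simp [Ne.symm e0],
    show ("glucose_fasting" == t) = false from by simp [Ne.symm e1],
    show ("insulin" == t) = false from by simp [Ne.symm e2],
    show ("total_cholesterol" == t) = false from by simp [Ne.symm e3],
    show ("hdl" == t) = false from by simp [Ne.symm e4],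
    show ("ldl" == t) = false from by simp [Ne.symm e5],
    show ("triglycerides" == t) = false from by simp [Ne.symm e6],
    show ("vldl" == t) = false from by simp [Ne.symm e7],
    show ("vitamin_d" == t) = false from by simp [Ne.symm e8],
    show ("vitamin_b12" == t) = false from by simp [Ne.symm e9],
    show ("tsh" == t) = false from by simp [Ne.symm e10],
    show ("t3" == t) = false from by simp [Ne.symm e11],
    show ("t4" == t) = false from by simp [Ne.symm e12],
    show ("sgot" == t) = false from by simp [Ne.symm e13],
    show ("sgpt" == t) = false from by simp [Ne.symm e14],
    show ("bilirubin_total" == t) = false from by simp [Ne.symm e15],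
    show ("alkaline_phosphatase" == t) = false from by simp [Ne.symm e16],
    show ("creatinine" == t) = false from by simp [Ne.symm e17],
    show ("urea" == t) = false from by simp [Ne.symm e18],
    show ("uric_acid" == t) = false from by simp [Ne.symm e19],
    show ("sodium" == t) = false from by simp [Ne.symm e20],
    show ("chloride" == t) = false from by simp [Ne.symm e21],
    show ("calcium" == t) = false from by simp [Ne.symm e22],
    show ("potassium" == t) = false from by simp [Ne.symm e23],
    show ("testosterone" == t) = false from by simp [Ne.symm e24],
    show ("prolactin" == t) = false from by simp [Ne.symm e25],
    show ("fsh" == t) = false from by simp [Ne.symm e26],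
    show ("lh" == t) = false from by simp [Ne.symm e27],
    show ("iron" == t) = false from by simp [Ne.symm e28],
    show ("tibc" == t) = false from by simp [Ne.symm e29],
    show ("transferrin_saturation" == t) = false from by simp [Ne.symm e30],
    show ("hemoglobin" == t) = false from by simp [Ne.symm e31],
    show ("hematocrit" == t) = false from by simp [Ne.symm e32],
    show ("wbc" == t) = false from by simp [Ne.symm e33],
    show ("platelets" == t) = false from by simp [Ne.symm e34],
    show ("rbc" == t) = false from by simp [Ne.symm e35]]

-- ===== VERDICT (by name: the statement is the Claim_ definition above) =====
theorem get_biomarker_category_spec : Claim_equal_get_biomarker_category := by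
  intro name _
  unfold Spec_get_biomarker_category get_biomarker_category get_biomarker_category_alt
  exact pvScan_eq_getD name
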